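-- pv_equiv track=rewrite | github.com/njs59/melanocyte | specialised_pipeline/pre_processing/pre_pro_operators.py | generate_filenames
-- ===== SOURCE A (Python) =====
-- def generate_filenames(experiment_id="B4", base="VID289"):
--     filenames = []
--
--     # Day 0: every 3 hours
--     for hour in range(6, 24, 3):
--         filename = f"{base}_{experiment_id}_1_00d{hour:02d}h00m"
--         filenames.append(filename)
--
--     # Days 1 to 4: only 00h
--     for day in range(1, 6):
--         filename = f"{base}_{experiment_id}_1_{day:02d}d00h00m"
--         filenames.append(filename)
--
--     return filenames
-- ===== SOURCE B (Python) =====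
-- def generate_filenames(experiment_id="B4", base="VID289"):
--     # Schedule as data, then one uniform formatting pass.
--     schedule = [(0, h) for h in range(6, 24, 3)] + [(d, 0) for d in range(1, 6)]
--     return [f"{base}_{experiment_id}_1_{day:02d}d{hour:02d}h00m" for day, hour in schedule]
-- ===== Notes on version B (the rewrite author's own statement) =====
-- stated objective: simpler
-- what changed: B factors the fixed schedule into a data list of (day, hour) pairs and formats all of them with one unified zero-padded template in a single pass, instead of two loops with two distinct format strings.
import Mathlib
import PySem

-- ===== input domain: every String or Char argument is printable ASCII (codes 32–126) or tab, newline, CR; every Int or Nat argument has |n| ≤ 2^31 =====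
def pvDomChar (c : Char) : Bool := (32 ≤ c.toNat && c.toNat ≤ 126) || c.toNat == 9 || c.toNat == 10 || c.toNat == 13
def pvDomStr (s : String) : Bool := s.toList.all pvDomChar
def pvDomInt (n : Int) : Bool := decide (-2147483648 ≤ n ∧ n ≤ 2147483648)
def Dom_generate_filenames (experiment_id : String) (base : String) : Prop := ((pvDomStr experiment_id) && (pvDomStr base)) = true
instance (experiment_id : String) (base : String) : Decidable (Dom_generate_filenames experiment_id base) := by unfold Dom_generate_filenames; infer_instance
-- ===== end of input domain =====

-- B builds the fixed (day, hour) schedule as data and formats it with one unified zero-padded template (simpler decomposition; same output).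


-- Python's {n:02d} for the nonnegative values used here (shared formatting helper)
def pad2 (n : Int) : String := if n < 10 then "0" ++ PySem.Int.toStr n else PySem.Int.toStr n

-- ===== PORT A =====
def generate_filenames (experiment_id : String) (base : String) : List String :=
  let filenames : List String := []
  -- Day 0: every 3 hours
  let filenames := (PySem.List.pyRange 6 24 3).foldl
    (fun acc hour => acc ++ [base ++ "_" ++ experiment_id ++ "_1_00d" ++ pad2 hour ++ "h00m"]) filenames
  -- Days 1 to 4: only 00h
  let filenames := (PySem.List.pyRange 1 6 1).foldl
    (fun acc day => acc ++ [base ++ "_" ++ experiment_id ++ "_1_" ++ pad2 day ++ "d00h00m"]) filenames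
  filenames

-- ===== PORT B =====
def generate_filenames_alt (experiment_id : String) (base : String) : List String :=
  let schedule : List (Int × Int) :=
    (PySem.List.pyRange 6 24 3).map (fun h => ((0 : Int), h))
      ++ (PySem.List.pyRange 1 6 1).map (fun d => (d, (0 : Int)))
  schedule.map (fun dh =>
    base ++ "_" ++ experiment_id ++ "_1_" ++ pad2 dh.1 ++ "d" ++ pad2 dh.2 ++ "h00m")

-- ===== PRECONDITION & SPEC =====
def Spec_generate_filenames (experiment_id : String) (base : String) (out : List String) : Prop := out = generate_filenames_alt experiment_id base
instance (experiment_id : String) (base : String) (out : List String) : Decidable (Spec_generate_filenames experiment_id base out) := by unfold Spec_generate_filenames; infer_instance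

-- ===== CLAIM (what is proved, stated in full; the proofs are below) =====
def Claim_equal_generate_filenames : Prop := ∀ (experiment_id : String) (base : String), Dom_generate_filenames experiment_id base → Spec_generate_filenames experiment_id base (generate_filenames experiment_id base)

-- ===== LEMMAS AND PROOFS =====

-- ===== VERDICT (by name: the statement is the Claim_ definition above) =====
theorem generate_filenames_spec : Claim_equal_generate_filenames := by
  intro e b _
  show generate_filenames e b = generate_filenames_alt e b
  simp [generate_filenames, generate_filenames_alt, PySem.List.pyRange, pad2,
        List.range_succ, String.append_assoc]
  decide
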